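-- pv_equiv track=rewrite | github.com/HenriHyttinen/Ai-assistant | backend/scripts/_legacy/select_best_recipes.py | determine_difficulty_from_categories
-- ===== SOURCE A (Python) =====
-- def determine_difficulty_from_categories(categories):
--     """Determine difficulty from actual categories"""
--     if not categories:
--         return "medium"
--
--     category_list = [cat.strip().lower() for cat in categories.split('\n') if cat.strip()]
--
--     if any(cat in category_list for cat in ['quick & easy', 'no-cook', 'kid-friendly']):
--         return "easy"
--     elif any(cat in category_list for cat in ['gourmet', 'bon appétit', 'complex', 'elaborate']):
--         return "hard"
--
--     return "medium"
-- ===== SOURCE B (Python) =====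
-- RANK = {'quick & easy': 0, 'no-cook': 0, 'kid-friendly': 0,
--         'gourmet': 1, 'bon appétit': 1, 'complex': 1, 'elaborate': 1}
-- LABELS = ('easy', 'hard', 'medium')
--
-- def determine_difficulty_from_categories(categories):
--     """Determine difficulty from actual categories"""
--     if not categories:
--         return "medium"
--     ranks = [RANK.get(line.strip().lower(), 2) for line in categories.split('\n')]
--     return LABELS[min(ranks, default=2)]
-- ===== Notes on version B (the rewrite author's own statement) =====
-- stated objective: alternative
-- what changed: Replaces the filtered list plus two any() keyword scans and branch-order precedence with rank minimisation: every split line is mapped through a rank dictionary (easy keywords 0, hard 1, anything else 2), the minimum rank is taken, and the answer is read from a label table, so precedence is numeric order instead of an if/elif chain.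
import Mathlib
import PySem

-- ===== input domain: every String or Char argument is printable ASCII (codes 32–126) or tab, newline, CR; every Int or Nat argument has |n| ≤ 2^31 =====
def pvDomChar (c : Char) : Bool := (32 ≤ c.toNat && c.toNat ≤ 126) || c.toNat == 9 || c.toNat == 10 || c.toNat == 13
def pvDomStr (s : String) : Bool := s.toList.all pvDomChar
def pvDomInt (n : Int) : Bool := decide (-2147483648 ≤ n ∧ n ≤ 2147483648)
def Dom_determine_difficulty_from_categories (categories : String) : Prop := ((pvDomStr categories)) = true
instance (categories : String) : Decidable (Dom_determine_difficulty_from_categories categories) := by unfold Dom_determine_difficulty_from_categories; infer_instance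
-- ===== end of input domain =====

-- B classifies by rank minimisation (rank dict + min + label table) instead of A's
-- two any() keyword scans with if/elif precedence; equal return values.

-- ===== PORT A =====
def determine_difficulty_from_categories (categories : String) : String :=
  if categories = "" then "medium"
  else
    let category_list : List String :=
      (((PySem.Str.split? categories "\n").getD []).filter
          (fun cat => PySem.Str.strip cat != "")).map
        (fun cat => PySem.Str.lower (PySem.Str.strip cat))
    if ["quick & easy", "no-cook", "kid-friendly"].any
        (fun cat => category_list.contains cat) then "easy"
    else if ["gourmet", "bon appétit", "complex", "elaborate"].any
        (fun cat => category_list.contains cat) then "hard"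
    else "medium"

-- ===== PORT B =====
def pvRankDict : PySem.Dict String Int := PySem.Dict.ofList
  [("quick & easy", 0), ("no-cook", 0), ("kid-friendly", 0),
   ("gourmet", 1), ("bon appétit", 1), ("complex", 1), ("elaborate", 1)]

def pvLabels : List String := ["easy", "hard", "medium"]

def determine_difficulty_from_categories_alt (categories : String) : String :=
  if categories = "" then "medium"
  else
    let ranks : List Int :=
      ((PySem.Str.split? categories "\n").getD []).map
        (fun line => PySem.Dict.getD pvRankDict (PySem.Str.lower (PySem.Str.strip line)) 2)
    (PySem.List.pyGet? pvLabels ((PySem.List.min? ranks (fun x => x)).getD 2)).getD ""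

-- ===== PRECONDITION & SPEC =====
def Spec_determine_difficulty_from_categories (categories : String) (out : String) : Prop := out = determine_difficulty_from_categories_alt categories
instance (categories : String) (out : String) : Decidable (Spec_determine_difficulty_from_categories categories out) := by unfold Spec_determine_difficulty_from_categories; infer_instance

-- ===== CLAIM =====
def Claim_equal_determine_difficulty_from_categories : Prop := ∀ (categories : String), Dom_determine_difficulty_from_categories categories → Spec_determine_difficulty_from_categories categories (determine_difficulty_from_categories categories)

-- ===== LEMMAS AND PROOFS =====

def pvEasySet : List String := ["quick & easy", "no-cook", "kid-friendly"]
def pvHardSet : List String := ["gourmet", "bon appétit", "complex", "elaborate"]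

-- normalized form of a line
def pvC (line : String) : String := PySem.Str.lower (PySem.Str.strip line)

-- the rank B assigns to a line
def pvR (line : String) : Int := PySem.Dict.getD pvRankDict (pvC line) 2

-- easy/hard membership of the normalized line
def pvE (line : String) : Bool := pvEasySet.contains (pvC line)
def pvH (line : String) : Bool := pvHardSet.contains (pvC line)

lemma rank_spec (c : String) :
    PySem.Dict.getD pvRankDict c 2 =
      if pvEasySet.contains c then 0 else if pvHardSet.contains c then 1 else 2 := by
  by_cases h1 : c = "quick & easy"; · subst h1; decide
  by_cases h2 : c = "no-cook"; · subst h2; decide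
  by_cases h3 : c = "kid-friendly"; · subst h3; decide
  by_cases h4 : c = "gourmet"; · subst h4; decide
  by_cases h5 : c = "bon appétit"; · subst h5; decide
  by_cases h6 : c = "complex"; · subst h6; decide
  by_cases h7 : c = "elaborate"; · subst h7; decide
  simp [pvRankDict, pvEasySet, pvHardSet, PySem.Dict.ofList, PySem.Dict.update,
    PySem.Dict.getD_insert, PySem.Dict.getD_empty, h1, h2, h3, h4, h5, h6, h7]

lemma pvR_eq (l : String) : pvR l = if pvE l then 0 else if pvH l then 1 else 2 := by
  simp [pvR, pvE, pvH, rank_spec]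

-- A's easy condition over the filtered+mapped list is 'some line is easy'
lemma pvCondE (ls : List String) :
    (["quick & easy", "no-cook", "kid-friendly"].any
      (fun cat => (((ls.filter (fun c => PySem.Str.strip c != "")).map
        (fun c => PySem.Str.lower (PySem.Str.strip c))).contains cat))) = ls.any pvE := by
  rw [Bool.eq_iff_iff]
  simp only [List.any_eq_true, List.contains_eq_mem, List.mem_map, List.mem_filter,
    decide_eq_true_eq, pvE, pvC, pvEasySet]
  constructor
  · rintro ⟨k, hk, x, ⟨hx, hq⟩, rfl⟩
    exact ⟨x, hx, by simpa using hk⟩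
  · rintro ⟨x, hx, hm⟩
    have hq : PySem.Str.strip x != "" := by
      by_contra h
      simp only [bne_iff_ne, ne_eq, not_not] at h
      rw [h] at hm
      revert hm; decide
    exact ⟨_, by simpa using hm, x, ⟨hx, hq⟩, rfl⟩

lemma pvCondH (ls : List String) :
    (["gourmet", "bon appétit", "complex", "elaborate"].any
      (fun cat => (((ls.filter (fun c => PySem.Str.strip c != "")).map
        (fun c => PySem.Str.lower (PySem.Str.strip c))).contains cat))) = ls.any pvH := by
  rw [Bool.eq_iff_iff]
  simp only [List.any_eq_true, List.contains_eq_mem, List.mem_map, List.mem_filter,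
    decide_eq_true_eq, pvH, pvC, pvHardSet]
  constructor
  · rintro ⟨k, hk, x, ⟨hx, hq⟩, rfl⟩
    exact ⟨x, hx, by simpa using hk⟩
  · rintro ⟨x, hx, hm⟩
    have hq : PySem.Str.strip x != "" := by
      by_contra h
      simp only [bne_iff_ne, ne_eq, not_not] at h
      rw [h] at hm
      revert hm; decide
    exact ⟨_, by simpa using hm, x, ⟨hx, hq⟩, rfl⟩

-- the running-min loop over ranks, characterised by the two any-flags
lemma fold_min (ls : List String) (a : Int) (ha : a = 0 ∨ a = 1 ∨ a = 2) :
    (ls.map pvR).foldl min a =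
      if a = 0 ∨ ls.any pvE then 0 else if a = 1 ∨ ls.any pvH then 1 else 2 := by
  induction ls generalizing a with
  | nil => rcases ha with rfl | rfl | rfl <;> simp
  | cons hd tl ih =>
    simp only [List.map_cons, List.foldl_cons, List.any_cons]
    by_cases he : pvE hd
    · have : min a (pvR hd) = 0 := by
        rw [pvR_eq]; rcases ha with rfl | rfl | rfl <;> simp [he]
      rw [this, ih 0 (Or.inl rfl)]
      simp [he]
    · by_cases hh : pvH hd
      · rcases ha with rfl | rfl | rfl
        · have hmin : min (0 : Int) (pvR hd) = 0 := by
            rw [pvR_eq]; norm_num [he, hh]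
          rw [hmin, ih 0 (Or.inl rfl)]; simp
        · have hmin : min (1 : Int) (pvR hd) = 1 := by
            rw [pvR_eq]; norm_num [he, hh]
          rw [hmin, ih 1 (Or.inr (Or.inl rfl))]; simp [he, hh]
        · have hmin : min (2 : Int) (pvR hd) = 1 := by
            rw [pvR_eq]; norm_num [he, hh]
          rw [hmin, ih 1 (Or.inr (Or.inl rfl))]; simp [he, hh]
      · have : min a (pvR hd) = a := by
          rw [pvR_eq]; rcases ha with rfl | rfl | rfl <;> simp [he, hh]
        rw [this, ih a ha]
        simp [he, hh]

-- ===== VERDICT =====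
theorem determine_difficulty_from_categories_spec : Claim_equal_determine_difficulty_from_categories := by
  intro categories _
  unfold Spec_determine_difficulty_from_categories
  unfold determine_difficulty_from_categories determine_difficulty_from_categories_alt
  by_cases hc : categories = ""
  · simp [hc]
  · simp only [hc, if_false]
    rw [pvCondE, pvCondH]
    cases hls : (PySem.Str.split? categories "\n").getD [] with
    | nil => decide
    | cons hd tl =>
      show _ = (PySem.List.pyGet? pvLabels
        ((PySem.List.min? (pvR hd :: tl.map pvR) (fun x => x)).getD 2)).getD ""
      rw [PySem.List.min?_id_cons]
      rw [show (tl.map pvR) = tl.map pvR from rfl]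
      rw [fold_min tl (pvR hd) (by rw [pvR_eq]; split_ifs <;> simp)]
      simp only [List.any_cons, pvR_eq]
      by_cases he : pvE hd <;> by_cases hhd : pvH hd <;>
        by_cases hte : tl.any pvE <;> by_cases hth : tl.any pvH <;>
          simp [he, hhd, hte, hth, pvLabels, PySem.List.pyGet?, PySem.List.pyIdx?]
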